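-- pv_equiv track=rewrite | github.com/alexandraback/datacollection | solutions_5695413893988352_0/Python/Chipe1/B.py | enum
-- ===== SOURCE A (Python) =====
-- def enum(s):
--     if s is '':
--         return ['']
--     if s[0] is not '?':
--         return [s[0]+suf for suf in enum(s[1:])]
--     else:
--         en=enum(s[1:])
--         return [c+suf for suf in en for c in '1234567890']
-- ===== SOURCE B (Python) =====
-- def enum(s):
--     result = ['']
--     for ch in reversed(s):
--         choices = '1234567890' if ch == '?' else [ch]
--         result = [c + suf for suf in result for c in choices]
--     return result
-- ===== Notes on version B (the rewrite author's own statement) =====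
-- stated objective: simpler
-- what changed: Replaced A's slice-based recursion on the string tail with a single iterative right-to-left pass over the characters keeping an accumulator list, with a uniform per-character choices list instead of two comprehension branches.
import Mathlib
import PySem

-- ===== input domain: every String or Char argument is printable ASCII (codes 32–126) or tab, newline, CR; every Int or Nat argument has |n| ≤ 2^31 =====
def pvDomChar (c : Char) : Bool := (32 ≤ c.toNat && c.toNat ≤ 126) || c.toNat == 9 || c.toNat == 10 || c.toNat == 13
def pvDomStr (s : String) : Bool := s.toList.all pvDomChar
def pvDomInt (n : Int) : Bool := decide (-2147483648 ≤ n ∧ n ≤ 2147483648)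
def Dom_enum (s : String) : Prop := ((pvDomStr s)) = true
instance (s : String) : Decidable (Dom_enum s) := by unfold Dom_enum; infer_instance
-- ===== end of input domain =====

-- B replaces A's slice-based recursion by one iterative right-to-left pass with an
-- accumulator (objective: simpler). Return values are equal on all inputs.

-- ===== PORT A =====
-- A recurses on the string: empty → [''], else head char prepended to each suffix of
-- the recursive result ('?' expands to the ten digits '1234567890', suffix outer loop).
def enumA : List Char → List (List Char)
  | [] => [[]]
  | c :: rest =>
    if c ≠ '?' then
      (enumA rest).map (fun suf => c :: suf)
    else
      let en := enumA rest
      en.flatMap (fun suf => ("1234567890".toList).map (fun d => d :: suf))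

def enum (s : String) : List String := (enumA s.toList).map (fun l => String.ofList l)

-- ===== PORT B =====
-- B: result := ['']; for ch over reversed(s) (a foldr over the chars), choices :=
-- digits if ch = '?' else [ch], result := [c+suf for suf in result for c in choices].
def enumB (s : List Char) : List (List Char) :=
  s.foldr
    (fun ch result =>
      let choices : List Char := if ch = '?' then "1234567890".toList else [ch]
      result.flatMap (fun suf => choices.map (fun c => c :: suf)))
    [[]]

def enum_alt (s : String) : List String := (enumB s.toList).map (fun l => String.ofList l)

-- ===== PRECONDITION & SPEC =====
def Spec_enum (s : String) (out : List String) : Prop := out = enum_alt s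
instance (s : String) (out : List String) : Decidable (Spec_enum s out) := by unfold Spec_enum; infer_instance

-- ===== CLAIM (what is proved, stated in full; the proofs are below) =====
def Claim_equal_enum : Prop := ∀ (s : String), Dom_enum s → Spec_enum s (enum s)

-- ===== LEMMAS AND PROOFS =====
theorem flatMap_single {α β : Type} (f : α → β) (l : List α) :
    l.flatMap (fun x => [f x]) = l.map f := by
  induction l with
  | nil => rfl
  | cons a t ih => simpa [List.flatMap] using ih

theorem enumA_eq_enumB (l : List Char) : enumA l = enumB l := by
  induction l with
  | nil => rfl
  | cons c rest ih =>
    have hB : enumB (c :: rest) =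
        (enumB rest).flatMap (fun suf =>
          ((if c = '?' then "1234567890".toList else [c]).map (fun x => x :: suf))) := rfl
    by_cases h : c = '?'
    · subst h
      simp [enumA, hB, ih]
    · simp [enumA, hB, h, ih, flatMap_single]

-- ===== VERDICT (by name: the statement is the Claim_ definition above) =====
theorem enum_spec : Claim_equal_enum := by
  intro s _
  unfold Spec_enum enum enum_alt
  rw [enumA_eq_enumB]
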